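-- pv_equiv track=rewrite | github.com/wylu/leetcodecn | src/python/explore/2020-2021跨年/Q30.用插线板制作章鱼脚状线路.py | plugBoard
-- ===== SOURCE A (Python) =====
-- def plugBoard(n: int) -> int:
--     def dfs(n: int) -> int:
--         if n == 1:
--             return 1
--
--         if f[n] != 0:
--             return f[n]
--
--         for i in range(1, n // 2 + 1):
--             j = n - i
--             if i == j:
--                 f[n] += (dfs(i) + 1) * dfs(i) // 2
--             else:
--                 f[n] += dfs(i) * dfs(j)
--
--         for i in range(1, n // 3 + 1):
--             for j in range(i, (n - i) // 2 + 1):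
--                 k = n - i - j
--                 if i == j and j == k:
--                     f[n] += (dfs(i) + 2) * (dfs(i) + 1) * dfs(i) // 6
--                 elif i == j:
--                     f[n] += (dfs(i) + 1) * dfs(i) // 2 * dfs(k)
--                 elif j == k:
--                     f[n] += dfs(i) * (dfs(j) + 1) * dfs(j) // 2
--                 else:
--                     f[n] += dfs(i) * dfs(j) * dfs(k)
--
--         return f[n]
--
--     f = [0] * (n + 1)
--     return dfs(n)
-- ===== SOURCE B (Python) =====
-- def plugBoard(n: int) -> int:
--     # Bottom-up DP: fill d[2..n] in a forward sweep instead of memoized recursion.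
--     d = [0] * (n + 1)
--     if n >= 1:
--         d[1] = 1
--     for m in range(2, n + 1):
--         total = 0
--         for i in range(1, m // 2 + 1):
--             j = m - i
--             if i == j:
--                 total += (d[i] + 1) * d[i] // 2
--             else:
--                 total += d[i] * d[j]
--         for i in range(1, m // 3 + 1):
--             for j in range(i, (m - i) // 2 + 1):
--                 k = m - i - j
--                 if i == j and j == k:
--                     total += (d[i] + 2) * (d[i] + 1) * d[i] // 6
--                 elif i == j:
--                     total += (d[i] + 1) * d[i] // 2 * d[k]
--                 elif j == k:
--                     total += d[i] * (d[j] + 1) * d[j] // 2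
--                 else:
--                     total += d[i] * d[j] * d[k]
--         d[m] = total
--     return d[n]
-- ===== Notes on version B (the rewrite author's own statement) =====
-- stated objective: alternative
-- what changed: Replaces the memoized top-down recursion (inner dfs closure writing into a memo list) with a bottom-up dynamic-programming sweep that fills the table in increasing order with the same pair/triple summations.
import Mathlib
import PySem

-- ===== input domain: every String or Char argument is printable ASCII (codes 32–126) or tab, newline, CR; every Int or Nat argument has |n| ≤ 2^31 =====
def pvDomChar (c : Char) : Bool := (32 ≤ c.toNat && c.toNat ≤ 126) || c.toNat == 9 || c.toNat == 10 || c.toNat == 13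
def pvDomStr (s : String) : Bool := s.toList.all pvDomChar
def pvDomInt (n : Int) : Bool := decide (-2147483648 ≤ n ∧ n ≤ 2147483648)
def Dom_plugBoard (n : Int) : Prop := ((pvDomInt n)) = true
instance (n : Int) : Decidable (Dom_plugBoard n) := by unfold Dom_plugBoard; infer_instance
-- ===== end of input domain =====

-- B replaces A's memoized top-down recursion by a bottom-up DP sweep over the same
-- pair/triple summations (a different decomposition of the same computation).

-- ===== PORT A =====
-- Shared helpers modelling the Python lists `f = [0] * (n+1)` / `d = [0] * (n+1)`:
-- a zero-initialised list is a dict of the written entries, read with default 0.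
def pvUpd (f : PySem.Dict Int Int) (i v : Int) : PySem.Dict Int Int := f.insert i v

def pvGet (f : PySem.Dict Int Int) (i : Int) : Int := f.getD i 0

-- Port of A's inner `dfs`, threading the memo list `f` (modelled as a total map
-- Int → Int, exact on Pre_, where every index Python touches is in range 0..n).
-- `fuel` bounds the recursion depth; dfs n only recurses on arguments < n, so
-- fuel = n+1 (as passed by plugBoard) never runs out on Pre_.
def dfsA : Nat → Int → PySem.Dict Int Int → Int × PySem.Dict Int Int
  | 0, _, f => (0, f)
  | fuel+1, n, f =>
    if n = 1 then (1, f)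
    else if pvGet f n ≠ 0 then (pvGet f n, f)
    else
      let f1 := (PySem.List.pyRange 1 (PySem.Int.floordiv n 2 + 1) 1).foldl (fun f i =>
        let j := n - i
        if i = j then
          let fn := pvGet f n
          let r1 := dfsA fuel i f
          let r2 := dfsA fuel i r1.2
          pvUpd r2.2 n (fn + PySem.Int.floordiv ((r1.1 + 1) * r2.1) 2)
        else
          let fn := pvGet f n
          let r1 := dfsA fuel i f
          let r2 := dfsA fuel j r1.2
          pvUpd r2.2 n (fn + r1.1 * r2.1)) f
      let f2 := (PySem.List.pyRange 1 (PySem.Int.floordiv n 3 + 1) 1).foldl (fun f i =>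
        (PySem.List.pyRange i (PySem.Int.floordiv (n - i) 2 + 1) 1).foldl (fun f j =>
          let k := n - i - j
          if i = j ∧ j = k then
            let fn := pvGet f n
            let r1 := dfsA fuel i f
            let r2 := dfsA fuel i r1.2
            let r3 := dfsA fuel i r2.2
            pvUpd r3.2 n (fn + PySem.Int.floordiv ((r1.1 + 2) * (r2.1 + 1) * r3.1) 6)
          else if i = j then
            let fn := pvGet f n
            let r1 := dfsA fuel i f
            let r2 := dfsA fuel i r1.2
            let r3 := dfsA fuel k r2.2
            pvUpd r3.2 n (fn + PySem.Int.floordiv ((r1.1 + 1) * r2.1) 2 * r3.1)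
          else if j = k then
            let fn := pvGet f n
            let r1 := dfsA fuel i f
            let r2 := dfsA fuel j r1.2
            let r3 := dfsA fuel j r2.2
            pvUpd r3.2 n (fn + PySem.Int.floordiv (r1.1 * (r2.1 + 1) * r3.1) 2)
          else
            let fn := pvGet f n
            let r1 := dfsA fuel i f
            let r2 := dfsA fuel j r1.2
            let r3 := dfsA fuel k r2.2
            pvUpd r3.2 n (fn + r1.1 * r2.1 * r3.1)) f) f1
      (pvGet f2 n, f2)

def plugBoard (n : Int) : Int := (dfsA (n.toNat + 1) n PySem.Dict.empty).1

-- ===== PORT B =====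
-- Source B's inner `for i` pair loop accumulating into `total`.
def pairLoop (d : Int → Int) (m total : Int) : Int :=
  (PySem.List.pyRange 1 (PySem.Int.floordiv m 2 + 1) 1).foldl (fun total i =>
    let j := m - i
    if i = j then total + PySem.Int.floordiv ((d i + 1) * d i) 2
    else total + d i * d j) total

-- Source B's nested `for i`/`for j` triple loop accumulating into `total`.
def tripleLoop (d : Int → Int) (m total : Int) : Int :=
  (PySem.List.pyRange 1 (PySem.Int.floordiv m 3 + 1) 1).foldl (fun total i =>
    (PySem.List.pyRange i (PySem.Int.floordiv (m - i) 2 + 1) 1).foldl (fun total j =>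
      let k := m - i - j
      if i = j ∧ j = k then total + PySem.Int.floordiv ((d i + 2) * (d i + 1) * d i) 6
      else if i = j then total + PySem.Int.floordiv ((d i + 1) * d i) 2 * d k
      else if j = k then total + PySem.Int.floordiv (d i * (d j + 1) * d j) 2
      else total + d i * d j * d k) total) total

-- Port of Source B: the DP list `d` is modelled as a total map (exact on Pre_).
def plugBoard_alt (n : Int) : Int :=
  let d0 : PySem.Dict Int Int := PySem.Dict.empty
  let d1 := if n ≥ 1 then pvUpd d0 1 1 else d0
  let d := (PySem.List.pyRange 2 (n + 1) 1).foldl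
    (fun d m => pvUpd d m (tripleLoop (pvGet d) m (pairLoop (pvGet d) m 0))) d1
  pvGet d n

-- ===== PRECONDITION & SPEC =====
-- Pre_ excludes negative n, on which A raises IndexError (the memo list is empty there, so the first read fails).
def Pre_plugBoard (n : Int) : Prop := 0 ≤ n
instance (n : Int) : Decidable (Pre_plugBoard n) := by unfold Pre_plugBoard; infer_instance

def pvWitness_plugBoard : Int := 5

def Spec_plugBoard (n : Int) (out : Int) : Prop := out = plugBoard_alt n
instance (n : Int) (out : Int) : Decidable (Spec_plugBoard n out) := by unfold Spec_plugBoard; infer_instance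

-- ===== CLAIM (what is proved, stated in full; the proofs are below) =====
def Claim_equal_plugBoard : Prop := ∀ (n : Int), Dom_plugBoard n → Pre_plugBoard n → Spec_plugBoard n (plugBoard n)

-- ===== LEMMAS AND PROOFS =====

lemma pvGet_upd (f : PySem.Dict Int Int) (k v m : Int) :
    pvGet (pvUpd f k v) m = if m = k then v else pvGet f m := by
  simp [pvGet, pvUpd, PySem.Dict.getD_insert]


-- The mathematical recurrence both programs compute, defined with explicit fuel.
def gF : Nat → Int → Int
  | 0, _ => 0
  | fuel+1, n =>
    if n = 1 then 1
    else tripleLoop (gF fuel) n (pairLoop (gF fuel) n 0)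

def g (n : Int) : Int := gF (n.toNat + 1) n

lemma g_zero : g 0 = 0 := by decide
lemma g_one : g 1 = 1 := by decide

lemma pairLoop_congr (r r' : Int → Int) (m t : Int)
    (h : ∀ x, 1 ≤ x → x < m → r x = r' x) :
    pairLoop r m t = pairLoop r' m t := by
  unfold pairLoop
  apply PySem.List.foldl_congr_mem
  intro acc x hx
  rw [PySem.List.mem_pyRange_one] at hx
  rw [PySem.Int.floordiv_eq_ediv_of_pos (by norm_num)] at hx
  have h1 : 1 ≤ x := hx.1
  have h2 : 2 * x ≤ m := by omega
  have hr1 : r x = r' x := h x h1 (by omega)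
  have hr2 : r (m - x) = r' (m - x) := h (m - x) (by omega) (by omega)
  simp only [hr1, hr2]

lemma tripleLoop_congr (r r' : Int → Int) (m t : Int)
    (h : ∀ x, 1 ≤ x → x < m → r x = r' x) :
    tripleLoop r m t = tripleLoop r' m t := by
  unfold tripleLoop
  apply PySem.List.foldl_congr_mem
  intro acc i hi
  rw [PySem.List.mem_pyRange_one] at hi
  rw [PySem.Int.floordiv_eq_ediv_of_pos (by norm_num)] at hi
  have hi3 : 3 * i ≤ m := by omega
  apply PySem.List.foldl_congr_mem
  intro acc2 j hj
  rw [PySem.List.mem_pyRange_one] at hj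
  rw [PySem.Int.floordiv_eq_ediv_of_pos (by norm_num)] at hj
  have hj2 : 2 * j ≤ m - i := by omega
  have hri : r i = r' i := h i hi.1 (by omega)
  have hrj : r j = r' j := h j (by omega) (by omega)
  have hrk : r (m - i - j) = r' (m - i - j) := h (m - i - j) (by omega) (by omega)
  simp only [hri, hrj, hrk]

lemma gF_zero (fuel : Nat) : gF fuel 0 = 0 := by
  cases fuel with
  | zero => rfl
  | succ k =>
    simp [gF, tripleLoop, pairLoop, PySem.List.pyRange_one_eq_nil le_rfl]

lemma gF_eq_g : ∀ (N : Nat) (n : Int) (fuel : Nat), 0 ≤ n → n.toNat ≤ N → n < (fuel : Int) →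
    gF fuel n = g n := by
  intro N
  induction N with
  | zero =>
    intro n fuel h0 hN hf
    have hn : n = 0 := by omega
    subst hn
    rw [gF_zero]
    show (0:Int) = gF 1 0
    rw [gF_zero]
  | succ N ih =>
    intro n fuel h0 hN hf
    by_cases hle : n.toNat ≤ N
    · exact ih n fuel h0 hle hf
    · cases fuel with
      | zero => exact absurd hf (by omega)
      | succ k =>
        have hrec : ∀ x, 1 ≤ x → x < n → gF k x = gF n.toNat x := by
          intro x h1 h2
          have hx0 : (0:Int) ≤ x := by omega
          rw [ih x k hx0 (by omega) (by omega)]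
          rw [ih x n.toNat hx0 (by omega) (by omega)]
        show gF (k+1) n = gF (n.toNat + 1) n
        by_cases h1 : n = 1
        · simp [gF, h1]
        · simp only [gF, if_neg h1]
          rw [pairLoop_congr _ _ n 0 hrec, tripleLoop_congr _ _ n _ hrec]

lemma g_unfold (n : Int) (h0 : 0 ≤ n) (h1 : n ≠ 1) :
    g n = tripleLoop g n (pairLoop g n 0) := by
  show gF (n.toNat + 1) n = _
  simp only [gF, if_neg h1]
  have hrec : ∀ x, 1 ≤ x → x < n → gF n.toNat x = g x := by
    intro x hx1 hx2
    exact gF_eq_g n.toNat x n.toNat (by omega) (by omega) (by omega)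
  rw [pairLoop_congr _ _ n 0 hrec, tripleLoop_congr _ _ n _ hrec]

theorem dfsA_main : ∀ (fuel : Nat) (n : Int) (f : PySem.Dict Int Int), 0 ≤ n → n < (fuel : Int) →
    (∀ m, m ≤ n → pvGet f m = 0 ∨ pvGet f m = g m) →
    (dfsA fuel n f).1 = g n ∧
    (∀ m, m ≤ n → (pvGet (dfsA fuel n f).2 m = 0 ∨ pvGet (dfsA fuel n f).2 m = g m)) ∧
    (∀ m, n < m → pvGet (dfsA fuel n f).2 m = pvGet f m) := by
  intro fuel
  induction fuel with
  | zero => intro n f h0 hfu _; exact absurd hfu (by exact_mod_cast by omega)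
  | succ fuel ih =>
    intro n f h0 hfu hg
    by_cases h1 : n = 1
    · subst h1
      simp only [dfsA]
      exact ⟨g_one.symm, hg, fun _ _ => rfl⟩
    · by_cases h2 : pvGet f n = 0
      · -- main branch
        have hnot : ¬ (pvGet f n ≠ 0) := by simp [h2]
        simp only [dfsA, if_neg h1, if_neg hnot]
        -- one recursive call, packaged with the loop invariant
        have callStep : ∀ (x : Int) (fc : PySem.Dict Int Int), 1 ≤ x → x < n →
            (∀ m, m ≤ n → m ≠ n → pvGet fc m = 0 ∨ pvGet fc m = g m) →
            (dfsA fuel x fc).1 = g x ∧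
            (∀ m, m ≤ n → m ≠ n → (pvGet (dfsA fuel x fc).2 m = 0 ∨ pvGet (dfsA fuel x fc).2 m = g m)) ∧
            (∀ m, x < m → pvGet (dfsA fuel x fc).2 m = pvGet fc m) := by
          intro x fc hx1 hxn hfc
          have hx0 : (0:Int) ≤ x := by omega
          have hxf : x < (fuel : Int) := by
            have : n ≤ (fuel : Int) := by exact_mod_cast by omega
            omega
          obtain ⟨e, p, fr⟩ := ih x fc hx0 hxf (fun m hm => hfc m (by omega) (by omega))
          refine ⟨e, ?_, fr⟩
          intro m hm hmn
          by_cases hmx : m ≤ x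
          · exact p m hmx
          · rw [fr m (by omega)]; exact hfc m hm hmn
        -- pair loop
        have hpair : ∀ (L : List Int), (∀ i ∈ L, 1 ≤ i ∧ 2 * i ≤ n) →
            ∀ (fc : PySem.Dict Int Int), (∀ m, m ≤ n → m ≠ n → pvGet fc m = 0 ∨ pvGet fc m = g m) →
            (∀ m, m ≤ n → m ≠ n →
              (pvGet (L.foldl (fun f i =>
                let j := n - i
                if i = j then
                  let fn := pvGet f n
                  let r1 := dfsA fuel i f
                  let r2 := dfsA fuel i r1.2
                  pvUpd r2.2 n (fn + PySem.Int.floordiv ((r1.1 + 1) * r2.1) 2)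
                else
                  let fn := pvGet f n
                  let r1 := dfsA fuel i f
                  let r2 := dfsA fuel j r1.2
                  pvUpd r2.2 n (fn + r1.1 * r2.1)) fc) m = 0 ∨
               pvGet (L.foldl (fun f i =>
                let j := n - i
                if i = j then
                  let fn := pvGet f n
                  let r1 := dfsA fuel i f
                  let r2 := dfsA fuel i r1.2
                  pvUpd r2.2 n (fn + PySem.Int.floordiv ((r1.1 + 1) * r2.1) 2)
                else
                  let fn := pvGet f n
                  let r1 := dfsA fuel i f
                  let r2 := dfsA fuel j r1.2
                  pvUpd r2.2 n (fn + r1.1 * r2.1)) fc) m = g m)) ∧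
            pvGet (L.foldl (fun f i =>
                let j := n - i
                if i = j then
                  let fn := pvGet f n
                  let r1 := dfsA fuel i f
                  let r2 := dfsA fuel i r1.2
                  pvUpd r2.2 n (fn + PySem.Int.floordiv ((r1.1 + 1) * r2.1) 2)
                else
                  let fn := pvGet f n
                  let r1 := dfsA fuel i f
                  let r2 := dfsA fuel j r1.2
                  pvUpd r2.2 n (fn + r1.1 * r2.1)) fc) n =
              L.foldl (fun total i =>
                let j := n - i
                if i = j then total + PySem.Int.floordiv ((g i + 1) * g i) 2
                else total + g i * g j) (pvGet fc n) ∧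
            (∀ m, n < m →
              pvGet (L.foldl (fun f i =>
                let j := n - i
                if i = j then
                  let fn := pvGet f n
                  let r1 := dfsA fuel i f
                  let r2 := dfsA fuel i r1.2
                  pvUpd r2.2 n (fn + PySem.Int.floordiv ((r1.1 + 1) * r2.1) 2)
                else
                  let fn := pvGet f n
                  let r1 := dfsA fuel i f
                  let r2 := dfsA fuel j r1.2
                  pvUpd r2.2 n (fn + r1.1 * r2.1)) fc) m = pvGet fc m) := by
          intro L
          induction L with
          | nil => intro _ fc hfc; exact ⟨hfc, rfl, fun _ _ => rfl⟩
          | cons i L ihL =>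
            intro hmem fc hfc
            obtain ⟨⟨hi1, hi2⟩, hrest⟩ := List.forall_mem_cons.mp hmem
            have hin : i < n := by omega
            have hj1 : 1 ≤ n - i := by omega
            have hjn : n - i < n := by omega
            simp only [List.foldl_cons]
            by_cases hij : i = n - i
            · -- i == j branch
              obtain ⟨e1, p1, fr1⟩ := callStep i fc hi1 hin hfc
              obtain ⟨e2, p2, fr2⟩ := callStep i (dfsA fuel i fc).2 hi1 hin p1
              have hstate : ∀ m, m ≤ n → m ≠ n →
                  pvGet (pvUpd (dfsA fuel i (dfsA fuel i fc).2).2 n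
                    (pvGet fc n + PySem.Int.floordiv (((dfsA fuel i fc).1 + 1) * (dfsA fuel i (dfsA fuel i fc).2).1) 2)) m = 0 ∨
                  pvGet (pvUpd (dfsA fuel i (dfsA fuel i fc).2).2 n
                    (pvGet fc n + PySem.Int.floordiv (((dfsA fuel i fc).1 + 1) * (dfsA fuel i (dfsA fuel i fc).2).1) 2)) m = g m := by
                intro m hm hmn
                simp only [pvGet_upd, if_neg hmn]
                exact p2 m hm hmn
              obtain ⟨P, S, F⟩ := ihL hrest _ hstate
              simp only [if_pos hij]
              refine ⟨P, ?_, ?_⟩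
              · rw [S]
                simp [pvGet_upd, e1, e2]
              · intro m hm
                rw [F m hm]
                simp only [pvGet_upd, if_neg (by omega : ¬ m = n)]
                rw [fr2 m (by omega), fr1 m (by omega)]
            · obtain ⟨e1, p1, fr1⟩ := callStep i fc hi1 hin hfc
              obtain ⟨e2, p2, fr2⟩ := callStep (n - i) (dfsA fuel i fc).2 hj1 hjn p1
              have hstate : ∀ m, m ≤ n → m ≠ n →
                  pvGet (pvUpd (dfsA fuel (n - i) (dfsA fuel i fc).2).2 n
                    (pvGet fc n + (dfsA fuel i fc).1 * (dfsA fuel (n - i) (dfsA fuel i fc).2).1)) m = 0 ∨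
                  pvGet (pvUpd (dfsA fuel (n - i) (dfsA fuel i fc).2).2 n
                    (pvGet fc n + (dfsA fuel i fc).1 * (dfsA fuel (n - i) (dfsA fuel i fc).2).1)) m = g m := by
                intro m hm hmn
                simp only [pvGet_upd, if_neg hmn]
                exact p2 m hm hmn
              obtain ⟨P, S, F⟩ := ihL hrest _ hstate
              simp only [if_neg hij]
              refine ⟨P, ?_, ?_⟩
              · rw [S]
                simp [pvGet_upd, e1, e2]
              · intro m hm
                rw [F m hm]
                simp only [pvGet_upd, if_neg (by omega : ¬ m = n)]
                rw [fr2 m (by omega), fr1 m (by omega)]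
        -- triple loop, inner
        -- triple loop, inner
        have htripleInner : ∀ (i : Int), 1 ≤ i → 3 * i ≤ n →
            ∀ (L : List Int), (∀ j ∈ L, i ≤ j ∧ 2 * j ≤ n - i) →
            ∀ (fc : PySem.Dict Int Int), (∀ m, m ≤ n → m ≠ n → pvGet fc m = 0 ∨ pvGet fc m = g m) →
            (∀ m, m ≤ n → m ≠ n →
              (pvGet (L.foldl (fun f j =>
              let k := n - i - j
              if i = j ∧ j = k then
                let fn := pvGet f n
                let r1 := dfsA fuel i f
                let r2 := dfsA fuel i r1.2
                let r3 := dfsA fuel i r2.2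
                pvUpd r3.2 n (fn + PySem.Int.floordiv ((r1.1 + 2) * (r2.1 + 1) * r3.1) 6)
              else if i = j then
                let fn := pvGet f n
                let r1 := dfsA fuel i f
                let r2 := dfsA fuel i r1.2
                let r3 := dfsA fuel k r2.2
                pvUpd r3.2 n (fn + PySem.Int.floordiv ((r1.1 + 1) * r2.1) 2 * r3.1)
              else if j = k then
                let fn := pvGet f n
                let r1 := dfsA fuel i f
                let r2 := dfsA fuel j r1.2
                let r3 := dfsA fuel j r2.2
                pvUpd r3.2 n (fn + PySem.Int.floordiv (r1.1 * (r2.1 + 1) * r3.1) 2)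
              else
                let fn := pvGet f n
                let r1 := dfsA fuel i f
                let r2 := dfsA fuel j r1.2
                let r3 := dfsA fuel k r2.2
                pvUpd r3.2 n (fn + r1.1 * r2.1 * r3.1)) fc) m = 0 ∨ pvGet (L.foldl (fun f j =>
              let k := n - i - j
              if i = j ∧ j = k then
                let fn := pvGet f n
                let r1 := dfsA fuel i f
                let r2 := dfsA fuel i r1.2
                let r3 := dfsA fuel i r2.2
                pvUpd r3.2 n (fn + PySem.Int.floordiv ((r1.1 + 2) * (r2.1 + 1) * r3.1) 6)
              else if i = j then
                let fn := pvGet f n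
                let r1 := dfsA fuel i f
                let r2 := dfsA fuel i r1.2
                let r3 := dfsA fuel k r2.2
                pvUpd r3.2 n (fn + PySem.Int.floordiv ((r1.1 + 1) * r2.1) 2 * r3.1)
              else if j = k then
                let fn := pvGet f n
                let r1 := dfsA fuel i f
                let r2 := dfsA fuel j r1.2
                let r3 := dfsA fuel j r2.2
                pvUpd r3.2 n (fn + PySem.Int.floordiv (r1.1 * (r2.1 + 1) * r3.1) 2)
              else
                let fn := pvGet f n
                let r1 := dfsA fuel i f
                let r2 := dfsA fuel j r1.2
                let r3 := dfsA fuel k r2.2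
                pvUpd r3.2 n (fn + r1.1 * r2.1 * r3.1)) fc) m = g m)) ∧
            pvGet (L.foldl (fun f j =>
              let k := n - i - j
              if i = j ∧ j = k then
                let fn := pvGet f n
                let r1 := dfsA fuel i f
                let r2 := dfsA fuel i r1.2
                let r3 := dfsA fuel i r2.2
                pvUpd r3.2 n (fn + PySem.Int.floordiv ((r1.1 + 2) * (r2.1 + 1) * r3.1) 6)
              else if i = j then
                let fn := pvGet f n
                let r1 := dfsA fuel i f
                let r2 := dfsA fuel i r1.2
                let r3 := dfsA fuel k r2.2
                pvUpd r3.2 n (fn + PySem.Int.floordiv ((r1.1 + 1) * r2.1) 2 * r3.1)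
              else if j = k then
                let fn := pvGet f n
                let r1 := dfsA fuel i f
                let r2 := dfsA fuel j r1.2
                let r3 := dfsA fuel j r2.2
                pvUpd r3.2 n (fn + PySem.Int.floordiv (r1.1 * (r2.1 + 1) * r3.1) 2)
              else
                let fn := pvGet f n
                let r1 := dfsA fuel i f
                let r2 := dfsA fuel j r1.2
                let r3 := dfsA fuel k r2.2
                pvUpd r3.2 n (fn + r1.1 * r2.1 * r3.1)) fc) n = (L.foldl (fun total j =>
              let k := n - i - j
              if i = j ∧ j = k then total + PySem.Int.floordiv ((g i + 2) * (g i + 1) * g i) 6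
              else if i = j then total + PySem.Int.floordiv ((g i + 1) * g i) 2 * g k
              else if j = k then total + PySem.Int.floordiv (g i * (g j + 1) * g j) 2
              else total + g i * g j * g k) (pvGet fc n)) ∧
            (∀ m, n < m → pvGet (L.foldl (fun f j =>
              let k := n - i - j
              if i = j ∧ j = k then
                let fn := pvGet f n
                let r1 := dfsA fuel i f
                let r2 := dfsA fuel i r1.2
                let r3 := dfsA fuel i r2.2
                pvUpd r3.2 n (fn + PySem.Int.floordiv ((r1.1 + 2) * (r2.1 + 1) * r3.1) 6)
              else if i = j then
                let fn := pvGet f n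
                let r1 := dfsA fuel i f
                let r2 := dfsA fuel i r1.2
                let r3 := dfsA fuel k r2.2
                pvUpd r3.2 n (fn + PySem.Int.floordiv ((r1.1 + 1) * r2.1) 2 * r3.1)
              else if j = k then
                let fn := pvGet f n
                let r1 := dfsA fuel i f
                let r2 := dfsA fuel j r1.2
                let r3 := dfsA fuel j r2.2
                pvUpd r3.2 n (fn + PySem.Int.floordiv (r1.1 * (r2.1 + 1) * r3.1) 2)
              else
                let fn := pvGet f n
                let r1 := dfsA fuel i f
                let r2 := dfsA fuel j r1.2
                let r3 := dfsA fuel k r2.2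
                pvUpd r3.2 n (fn + r1.1 * r2.1 * r3.1)) fc) m = pvGet fc m) := by
          intro i hi1 hi3 L
          induction L with
          | nil => intro _ fc hfc; exact ⟨hfc, rfl, fun _ _ => rfl⟩
          | cons j L ihL =>
            intro hmem fc hfc
            obtain ⟨⟨hj1, hj2⟩, hrest⟩ := List.forall_mem_cons.mp hmem
            simp only [List.foldl_cons]
            by_cases hc1 : i = j ∧ j = n - i - j
            · obtain ⟨hij, hjk⟩ := hc1
              obtain ⟨e1, p1, fr1⟩ := callStep i fc (by omega) (by omega) hfc
              obtain ⟨e2, p2, fr2⟩ := callStep i (dfsA fuel i fc).2 (by omega) (by omega) p1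
              obtain ⟨e3, p3, fr3⟩ := callStep i (dfsA fuel i (dfsA fuel i fc).2).2 (by omega) (by omega) p2
              have hstate : ∀ m, m ≤ n → m ≠ n →
                  (pvGet (pvUpd (dfsA fuel i (dfsA fuel i (dfsA fuel i fc).2).2).2 n (pvGet fc n + PySem.Int.floordiv (((dfsA fuel i fc).1 + 2) * ((dfsA fuel i (dfsA fuel i fc).2).1 + 1) * (dfsA fuel i (dfsA fuel i (dfsA fuel i fc).2).2).1) 6)) m = 0 ∨
                   pvGet (pvUpd (dfsA fuel i (dfsA fuel i (dfsA fuel i fc).2).2).2 n (pvGet fc n + PySem.Int.floordiv (((dfsA fuel i fc).1 + 2) * ((dfsA fuel i (dfsA fuel i fc).2).1 + 1) * (dfsA fuel i (dfsA fuel i (dfsA fuel i fc).2).2).1) 6)) m = g m) := by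
                intro m hm hmn
                simp only [pvGet_upd, if_neg hmn]
                exact p3 m hm hmn
              obtain ⟨P, S, F⟩ := ihL hrest _ hstate
              simp only [if_pos (⟨hij, hjk⟩ : i = j ∧ j = n - i - j)]
              refine ⟨P, ?_, ?_⟩
              · rw [S]
                simp [pvGet_upd, e1, e2, e3]
              · intro m hm
                rw [F m hm]
                simp only [pvGet_upd, if_neg (by omega : ¬ m = n)]
                rw [fr3 m (by omega), fr2 m (by omega), fr1 m (by omega)]
            · by_cases hc2 : i = j
              · obtain ⟨e1, p1, fr1⟩ := callStep i fc (by omega) (by omega) hfc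
                obtain ⟨e2, p2, fr2⟩ := callStep i (dfsA fuel i fc).2 (by omega) (by omega) p1
                obtain ⟨e3, p3, fr3⟩ := callStep (n - i - j) (dfsA fuel i (dfsA fuel i fc).2).2 (by omega) (by omega) p2
                have hstate : ∀ m, m ≤ n → m ≠ n →
                    (pvGet (pvUpd (dfsA fuel (n - i - j) (dfsA fuel i (dfsA fuel i fc).2).2).2 n (pvGet fc n + PySem.Int.floordiv (((dfsA fuel i fc).1 + 1) * (dfsA fuel i (dfsA fuel i fc).2).1) 2 * (dfsA fuel (n - i - j) (dfsA fuel i (dfsA fuel i fc).2).2).1)) m = 0 ∨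
                     pvGet (pvUpd (dfsA fuel (n - i - j) (dfsA fuel i (dfsA fuel i fc).2).2).2 n (pvGet fc n + PySem.Int.floordiv (((dfsA fuel i fc).1 + 1) * (dfsA fuel i (dfsA fuel i fc).2).1) 2 * (dfsA fuel (n - i - j) (dfsA fuel i (dfsA fuel i fc).2).2).1)) m = g m) := by
                  intro m hm hmn
                  simp only [pvGet_upd, if_neg hmn]
                  exact p3 m hm hmn
                obtain ⟨P, S, F⟩ := ihL hrest _ hstate
                simp only [if_neg hc1, if_pos hc2]
                refine ⟨P, ?_, ?_⟩
                · rw [S]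
                  simp [pvGet_upd, e1, e2, e3]
                · intro m hm
                  rw [F m hm]
                  simp only [pvGet_upd, if_neg (by omega : ¬ m = n)]
                  rw [fr3 m (by omega), fr2 m (by omega), fr1 m (by omega)]
              · by_cases hc3 : j = n - i - j
                · obtain ⟨e1, p1, fr1⟩ := callStep i fc (by omega) (by omega) hfc
                  obtain ⟨e2, p2, fr2⟩ := callStep j (dfsA fuel i fc).2 (by omega) (by omega) p1
                  obtain ⟨e3, p3, fr3⟩ := callStep j (dfsA fuel j (dfsA fuel i fc).2).2 (by omega) (by omega) p2
                  have hstate : ∀ m, m ≤ n → m ≠ n →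
                      (pvGet (pvUpd (dfsA fuel j (dfsA fuel j (dfsA fuel i fc).2).2).2 n (pvGet fc n + PySem.Int.floordiv ((dfsA fuel i fc).1 * ((dfsA fuel j (dfsA fuel i fc).2).1 + 1) * (dfsA fuel j (dfsA fuel j (dfsA fuel i fc).2).2).1) 2)) m = 0 ∨
                       pvGet (pvUpd (dfsA fuel j (dfsA fuel j (dfsA fuel i fc).2).2).2 n (pvGet fc n + PySem.Int.floordiv ((dfsA fuel i fc).1 * ((dfsA fuel j (dfsA fuel i fc).2).1 + 1) * (dfsA fuel j (dfsA fuel j (dfsA fuel i fc).2).2).1) 2)) m = g m) := by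
                    intro m hm hmn
                    simp only [pvGet_upd, if_neg hmn]
                    exact p3 m hm hmn
                  obtain ⟨P, S, F⟩ := ihL hrest _ hstate
                  simp only [if_neg hc1, if_neg hc2, if_pos hc3]
                  refine ⟨P, ?_, ?_⟩
                  · rw [S]
                    simp [pvGet_upd, e1, e2, e3]
                  · intro m hm
                    rw [F m hm]
                    simp only [pvGet_upd, if_neg (by omega : ¬ m = n)]
                    rw [fr3 m (by omega), fr2 m (by omega), fr1 m (by omega)]
                · obtain ⟨e1, p1, fr1⟩ := callStep i fc (by omega) (by omega) hfc
                  obtain ⟨e2, p2, fr2⟩ := callStep j (dfsA fuel i fc).2 (by omega) (by omega) p1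
                  obtain ⟨e3, p3, fr3⟩ := callStep (n - i - j) (dfsA fuel j (dfsA fuel i fc).2).2 (by omega) (by omega) p2
                  have hstate : ∀ m, m ≤ n → m ≠ n →
                      (pvGet (pvUpd (dfsA fuel (n - i - j) (dfsA fuel j (dfsA fuel i fc).2).2).2 n (pvGet fc n + (dfsA fuel i fc).1 * (dfsA fuel j (dfsA fuel i fc).2).1 * (dfsA fuel (n - i - j) (dfsA fuel j (dfsA fuel i fc).2).2).1)) m = 0 ∨
                       pvGet (pvUpd (dfsA fuel (n - i - j) (dfsA fuel j (dfsA fuel i fc).2).2).2 n (pvGet fc n + (dfsA fuel i fc).1 * (dfsA fuel j (dfsA fuel i fc).2).1 * (dfsA fuel (n - i - j) (dfsA fuel j (dfsA fuel i fc).2).2).1)) m = g m) := by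
                    intro m hm hmn
                    simp only [pvGet_upd, if_neg hmn]
                    exact p3 m hm hmn
                  obtain ⟨P, S, F⟩ := ihL hrest _ hstate
                  simp only [if_neg hc1, if_neg hc2, if_neg hc3]
                  refine ⟨P, ?_, ?_⟩
                  · rw [S]
                    simp [pvGet_upd, e1, e2, e3]
                  · intro m hm
                    rw [F m hm]
                    simp only [pvGet_upd, if_neg (by omega : ¬ m = n)]
                    rw [fr3 m (by omega), fr2 m (by omega), fr1 m (by omega)]
        have htripleOuter : ∀ (L : List Int), (∀ i ∈ L, 1 ≤ i ∧ 3 * i ≤ n) →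
            ∀ (fc : PySem.Dict Int Int), (∀ m, m ≤ n → m ≠ n → pvGet fc m = 0 ∨ pvGet fc m = g m) →
            (∀ m, m ≤ n → m ≠ n →
              (pvGet (L.foldl (fun f i =>
            (PySem.List.pyRange i (PySem.Int.floordiv (n - i) 2 + 1) 1).foldl (fun f j =>
              let k := n - i - j
              if i = j ∧ j = k then
                let fn := pvGet f n
                let r1 := dfsA fuel i f
                let r2 := dfsA fuel i r1.2
                let r3 := dfsA fuel i r2.2
                pvUpd r3.2 n (fn + PySem.Int.floordiv ((r1.1 + 2) * (r2.1 + 1) * r3.1) 6)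
              else if i = j then
                let fn := pvGet f n
                let r1 := dfsA fuel i f
                let r2 := dfsA fuel i r1.2
                let r3 := dfsA fuel k r2.2
                pvUpd r3.2 n (fn + PySem.Int.floordiv ((r1.1 + 1) * r2.1) 2 * r3.1)
              else if j = k then
                let fn := pvGet f n
                let r1 := dfsA fuel i f
                let r2 := dfsA fuel j r1.2
                let r3 := dfsA fuel j r2.2
                pvUpd r3.2 n (fn + PySem.Int.floordiv (r1.1 * (r2.1 + 1) * r3.1) 2)
              else
                let fn := pvGet f n
                let r1 := dfsA fuel i f
                let r2 := dfsA fuel j r1.2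
                let r3 := dfsA fuel k r2.2
                pvUpd r3.2 n (fn + r1.1 * r2.1 * r3.1)) f) fc) m = 0 ∨ pvGet (L.foldl (fun f i =>
            (PySem.List.pyRange i (PySem.Int.floordiv (n - i) 2 + 1) 1).foldl (fun f j =>
              let k := n - i - j
              if i = j ∧ j = k then
                let fn := pvGet f n
                let r1 := dfsA fuel i f
                let r2 := dfsA fuel i r1.2
                let r3 := dfsA fuel i r2.2
                pvUpd r3.2 n (fn + PySem.Int.floordiv ((r1.1 + 2) * (r2.1 + 1) * r3.1) 6)
              else if i = j then
                let fn := pvGet f n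
                let r1 := dfsA fuel i f
                let r2 := dfsA fuel i r1.2
                let r3 := dfsA fuel k r2.2
                pvUpd r3.2 n (fn + PySem.Int.floordiv ((r1.1 + 1) * r2.1) 2 * r3.1)
              else if j = k then
                let fn := pvGet f n
                let r1 := dfsA fuel i f
                let r2 := dfsA fuel j r1.2
                let r3 := dfsA fuel j r2.2
                pvUpd r3.2 n (fn + PySem.Int.floordiv (r1.1 * (r2.1 + 1) * r3.1) 2)
              else
                let fn := pvGet f n
                let r1 := dfsA fuel i f
                let r2 := dfsA fuel j r1.2
                let r3 := dfsA fuel k r2.2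
                pvUpd r3.2 n (fn + r1.1 * r2.1 * r3.1)) f) fc) m = g m)) ∧
            pvGet (L.foldl (fun f i =>
            (PySem.List.pyRange i (PySem.Int.floordiv (n - i) 2 + 1) 1).foldl (fun f j =>
              let k := n - i - j
              if i = j ∧ j = k then
                let fn := pvGet f n
                let r1 := dfsA fuel i f
                let r2 := dfsA fuel i r1.2
                let r3 := dfsA fuel i r2.2
                pvUpd r3.2 n (fn + PySem.Int.floordiv ((r1.1 + 2) * (r2.1 + 1) * r3.1) 6)
              else if i = j then
                let fn := pvGet f n
                let r1 := dfsA fuel i f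
                let r2 := dfsA fuel i r1.2
                let r3 := dfsA fuel k r2.2
                pvUpd r3.2 n (fn + PySem.Int.floordiv ((r1.1 + 1) * r2.1) 2 * r3.1)
              else if j = k then
                let fn := pvGet f n
                let r1 := dfsA fuel i f
                let r2 := dfsA fuel j r1.2
                let r3 := dfsA fuel j r2.2
                pvUpd r3.2 n (fn + PySem.Int.floordiv (r1.1 * (r2.1 + 1) * r3.1) 2)
              else
                let fn := pvGet f n
                let r1 := dfsA fuel i f
                let r2 := dfsA fuel j r1.2
                let r3 := dfsA fuel k r2.2
                pvUpd r3.2 n (fn + r1.1 * r2.1 * r3.1)) f) fc) n = L.foldl (fun total i =>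
            (PySem.List.pyRange i (PySem.Int.floordiv (n - i) 2 + 1) 1).foldl (fun total j =>
              let k := n - i - j
              if i = j ∧ j = k then total + PySem.Int.floordiv ((g i + 2) * (g i + 1) * g i) 6
              else if i = j then total + PySem.Int.floordiv ((g i + 1) * g i) 2 * g k
              else if j = k then total + PySem.Int.floordiv (g i * (g j + 1) * g j) 2
              else total + g i * g j * g k) total) (pvGet fc n) ∧
            (∀ m, n < m → pvGet (L.foldl (fun f i =>
            (PySem.List.pyRange i (PySem.Int.floordiv (n - i) 2 + 1) 1).foldl (fun f j =>
              let k := n - i - j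
              if i = j ∧ j = k then
                let fn := pvGet f n
                let r1 := dfsA fuel i f
                let r2 := dfsA fuel i r1.2
                let r3 := dfsA fuel i r2.2
                pvUpd r3.2 n (fn + PySem.Int.floordiv ((r1.1 + 2) * (r2.1 + 1) * r3.1) 6)
              else if i = j then
                let fn := pvGet f n
                let r1 := dfsA fuel i f
                let r2 := dfsA fuel i r1.2
                let r3 := dfsA fuel k r2.2
                pvUpd r3.2 n (fn + PySem.Int.floordiv ((r1.1 + 1) * r2.1) 2 * r3.1)
              else if j = k then
                let fn := pvGet f n
                let r1 := dfsA fuel i f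
                let r2 := dfsA fuel j r1.2
                let r3 := dfsA fuel j r2.2
                pvUpd r3.2 n (fn + PySem.Int.floordiv (r1.1 * (r2.1 + 1) * r3.1) 2)
              else
                let fn := pvGet f n
                let r1 := dfsA fuel i f
                let r2 := dfsA fuel j r1.2
                let r3 := dfsA fuel k r2.2
                pvUpd r3.2 n (fn + r1.1 * r2.1 * r3.1)) f) fc) m = pvGet fc m) := by
          intro L
          induction L with
          | nil => intro _ fc hfc; exact ⟨hfc, rfl, fun _ _ => rfl⟩
          | cons i L ihL =>
            intro hmem fc hfc
            obtain ⟨⟨hi1, hi3⟩, hrest⟩ := List.forall_mem_cons.mp hmem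
            have hmemIn : ∀ j ∈ PySem.List.pyRange i (PySem.Int.floordiv (n - i) 2 + 1) 1,
                i ≤ j ∧ 2 * j ≤ n - i := by
              intro j hj
              rw [PySem.List.mem_pyRange_one] at hj
              rw [PySem.Int.floordiv_eq_ediv_of_pos (by norm_num)] at hj
              omega
            obtain ⟨p1, s1, f1⟩ := htripleInner i hi1 hi3 _ hmemIn fc hfc
            simp only [List.foldl_cons]
            obtain ⟨P, S, F⟩ := ihL hrest _ p1
            refine ⟨P, ?_, ?_⟩
            · rw [S, s1]
            · intro m hm
              rw [F m hm, f1 m hm]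
        -- assembly
        have memPair : ∀ i ∈ PySem.List.pyRange 1 (PySem.Int.floordiv n 2 + 1) 1,
            1 ≤ i ∧ 2 * i ≤ n := by
          intro i hi
          rw [PySem.List.mem_pyRange_one] at hi
          rw [PySem.Int.floordiv_eq_ediv_of_pos (by norm_num)] at hi
          omega
        have memTri : ∀ i ∈ PySem.List.pyRange 1 (PySem.Int.floordiv n 3 + 1) 1,
            1 ≤ i ∧ 3 * i ≤ n := by
          intro i hi
          rw [PySem.List.mem_pyRange_one] at hi
          rw [PySem.Int.floordiv_eq_ediv_of_pos (by norm_num)] at hi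
          omega
        obtain ⟨P1, S1, F1⟩ := hpair _ memPair f (fun m hm _ => hg m hm)
        obtain ⟨P2, S2, F2⟩ := htripleOuter _ memTri _ P1
        refine ⟨?_, ?_, ?_⟩
        · rw [S2, S1, h2, g_unfold n h0 h1]
          simp only [tripleLoop, pairLoop]
        · intro m hm
          by_cases hmn : m = n
          · subst hmn
            right
            rw [S2, S1, h2, g_unfold m h0 h1]
            simp only [tripleLoop, pairLoop]
          · exact P2 m hm hmn
        · intro m hm
          rw [F2 m hm, F1 m hm]
      · have hnn : pvGet f n ≠ 0 := h2
        simp only [dfsA, if_neg h1, if_pos hnn]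
        have := hg n le_rfl
        rcases this with h | h
        · exact absurd h h2
        · exact ⟨h, hg, fun _ _ => trivial⟩

lemma buildB_good : ∀ (N : Nat) (m : Int), 0 ≤ m → m ≤ (N : Int) →
    pvGet ((PySem.List.pyRange 2 ((N : Int) + 1) 1).foldl
      (fun d m => pvUpd d m (tripleLoop (pvGet d) m (pairLoop (pvGet d) m 0)))
      (if (N : Int) ≥ 1 then pvUpd PySem.Dict.empty 1 1 else PySem.Dict.empty)) m = g m := by
  intro N
  induction N with
  | zero =>
    intro m h0 hm
    have : m = 0 := by omega
    subst this
    rw [PySem.List.pyRange_one_eq_nil (by norm_num)]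
    simp only [List.foldl_nil]
    rw [if_neg (by norm_num)]
    simp [pvGet, PySem.Dict.getD_empty, g_zero]
  | succ N ih =>
    intro m h0 hm
    cases Nat.eq_zero_or_pos N with
    | inl hN =>
      subst hN
      rw [PySem.List.pyRange_one_eq_nil (by norm_num)]
      simp only [List.foldl_nil]
      rw [if_pos (by norm_num)]
      interval_cases m
      · simp [pvUpd, pvGet, PySem.Dict.getD_insert, PySem.Dict.getD_empty, g_zero]
      · simp [pvUpd, pvGet, g_one]
    | inr hN =>
      have hsplit : PySem.List.pyRange 2 ((N:Int) + 1 + 1) 1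
          = PySem.List.pyRange 2 ((N:Int) + 1) 1 ++ [(N:Int) + 1] := by
        exact PySem.List.pyRange_one_succ_right (by omega)
      have hinit : (if ((N:Int) + 1) ≥ 1 then pvUpd PySem.Dict.empty 1 1 else (PySem.Dict.empty : PySem.Dict Int Int))
          = (if (N:Int) ≥ 1 then pvUpd PySem.Dict.empty 1 1 else (PySem.Dict.empty : PySem.Dict Int Int)) := by
        rw [if_pos (by omega), if_pos (by exact_mod_cast Int.ofNat_le.mpr hN)]
      push_cast at ih hm ⊢
      rw [hsplit, List.foldl_append, hinit]
      simp only [List.foldl_cons, List.foldl_nil]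
      set D := (PySem.List.pyRange 2 ((N:Int) + 1) 1).foldl
        (fun d m => pvUpd d m (tripleLoop (pvGet d) m (pairLoop (pvGet d) m 0)))
        (if (N:Int) ≥ 1 then pvUpd PySem.Dict.empty 1 1 else (PySem.Dict.empty : PySem.Dict Int Int)) with hD
      have hDg : ∀ x, 1 ≤ x → x < (N:Int) + 1 → pvGet D x = g x := by
        intro x h1 h2
        exact ih x (by omega) (by omega)
      by_cases hmN : m = (N:Int) + 1
      · subst hmN
        show pvGet (pvUpd D ((N:Int)+1) _) ((N:Int)+1) = _
        simp only [pvGet_upd, if_pos]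
        rw [pairLoop_congr (pvGet D) g _ 0 hDg, tripleLoop_congr (pvGet D) g _ _ hDg]
        exact (g_unfold ((N:Int)+1) (by omega) (by omega)).symm
      · show pvGet (pvUpd D ((N:Int)+1) _) m = _
        simp only [pvGet_upd, if_neg hmN]
        exact ih m h0 (by omega)

-- ===== VERDICT (by name: the statement is the Claim_ definition above) =====
theorem plugBoard_spec : Claim_equal_plugBoard := by
  intro n _ hpre
  unfold Spec_plugBoard plugBoard plugBoard_alt
  have h0 : (0:Int) ≤ n := hpre
  have hA : (dfsA (n.toNat + 1) n PySem.Dict.empty).1 = g n := by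
    refine (dfsA_main (n.toNat + 1) n PySem.Dict.empty h0 (by omega) ?_).1
    intro m _; exact Or.inl rfl
  have hn : ((n.toNat : Int)) = n := Int.toNat_of_nonneg h0
  have hB := buildB_good n.toNat n h0 (by omega)
  rw [hA]
  rw [hn] at hB
  exact hB.symm
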